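-- pv_equiv track=rewrite | github.com/BennyJane/algorithm_mad | niuke/huawei/Q4.py | solution71
-- ===== SOURCE A (Python) =====
-- def solution71(m, n, s):
--     array = list(map(int, s.split(" ")))
--
--     time = 0
--     # 剩余任务量
--     retain = 0
--     for i in range(n):
--         tasks = array[i] + retain
--         time += 1
--         retain = max(0, tasks - m)
--
--     time = time + (retain + m - 1) // m
--     return time
-- ===== SOURCE B (Python) =====
-- def solution71(m, n, s):
--     a = list(map(int, s.split(" ")))
--     k = max(n, 0)
--     # prefix sums of (a[i] - m); the leftover work equals last - min of these,
--     # since the clamped carry is the max suffix sum of (a[i] - m)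
--     pre = [0]
--     for i in range(k):
--         pre.append(pre[-1] + a[i] - m)
--     retain = pre[-1] - min(pre)
--     return k + (retain + m - 1) // m
-- ===== Notes on version B (the rewrite author's own statement) =====
-- stated objective: alternative
-- what changed: B replaces A's single clamped-carry simulation by a staged computation: it builds the list of prefix sums of (a[i]-m) and reads the leftover work off as last-minus-min of that list, using the identity clamped carry = max suffix sum = total - min prefix sum.
import Mathlib
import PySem

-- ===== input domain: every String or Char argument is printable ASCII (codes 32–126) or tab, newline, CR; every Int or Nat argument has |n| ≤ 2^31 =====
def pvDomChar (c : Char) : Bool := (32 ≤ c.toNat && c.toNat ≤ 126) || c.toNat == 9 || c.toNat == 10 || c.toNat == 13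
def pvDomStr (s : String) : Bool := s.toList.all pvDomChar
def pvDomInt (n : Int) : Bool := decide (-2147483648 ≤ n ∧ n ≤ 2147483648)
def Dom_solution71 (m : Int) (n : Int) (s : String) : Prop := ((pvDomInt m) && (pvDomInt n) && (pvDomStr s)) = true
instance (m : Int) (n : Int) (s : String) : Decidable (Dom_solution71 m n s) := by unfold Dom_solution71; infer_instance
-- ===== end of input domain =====

-- B replaces A's clamped-carry simulation by a staged computation: it builds the
-- list of prefix sums of (a[i] - m) and reads the leftover work off as
-- last - min of that list; same cost, different algorithm (objective: alternative).

-- ===== PORT A =====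
def solution71 (m : Int) (n : Int) (s : String) : Int :=
  let array : List Int :=
    ((PySem.Str.split? s " ").getD []).map (fun t => (PySem.Int.ofStr? t).getD 0)
  -- state = (time, retain); array[i] is pyGetD, total under Pre_
  let st :=
    (PySem.List.pyRange 0 n 1).foldl
      (fun (st : Int × Int) i =>
        let tasks := PySem.List.pyGetD array i 0 + st.2
        (st.1 + 1, max 0 (tasks - m)))
      (0, 0)
  st.1 + PySem.Int.floordiv (st.2 + m - 1) m

-- ===== PORT B =====
def solution71_alt (m : Int) (n : Int) (s : String) : Int :=
  let a : List Int :=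
    ((PySem.Str.split? s " ").getD []).map (fun t => (PySem.Int.ofStr? t).getD 0)
  let k : Int := max n 0
  -- pre = list of prefix sums of (a[i] - m), built by appending pre[-1] + a[i] - m
  let pre :=
    (PySem.List.pyRange 0 k 1).foldl
      (fun (pre : List Int) i =>
        pre ++ [PySem.List.pyGetD pre (-1) 0 + PySem.List.pyGetD a i 0 - m])
      [0]
  let retain :=
    PySem.List.pyGetD pre (-1) 0 - (PySem.List.min? pre (fun y => y)).getD 0
  k + PySem.Int.floordiv (retain + m - 1) m

-- ===== PRECONDITION & SPEC =====
-- Pre_ excludes exactly the inputs where the Python A raises: a token int() rejects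
-- (ValueError), n beyond the token list (IndexError), and m = 0 (ZeroDivisionError).
def Pre_solution71 (m : Int) (n : Int) (s : String) : Prop :=
  m ≠ 0 ∧ n ≤ (((PySem.Str.split? s " ").getD []).length : Int) ∧
    ∀ t ∈ (PySem.Str.split? s " ").getD [], (PySem.Int.ofStr? t).isSome
instance (m : Int) (n : Int) (s : String) : Decidable (Pre_solution71 m n s) := by
  unfold Pre_solution71; infer_instance

def pvWitness_solution71 : Int × Int × String := (2, 2, "3 1")

def Spec_solution71 (m : Int) (n : Int) (s : String) (out : Int) : Prop := out = solution71_alt m n s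
instance (m : Int) (n : Int) (s : String) (out : Int) : Decidable (Spec_solution71 m n s out) := by unfold Spec_solution71; infer_instance

-- ===== CLAIM (what is proved, stated in full; the proofs are below) =====
def Claim_equal_solution71 : Prop := ∀ (m : Int) (n : Int) (s : String), Dom_solution71 m n s → Pre_solution71 m n s → Spec_solution71 m n s (solution71 m n s)

-- ===== LEMMAS AND PROOFS =====

-- total surplus of a task list: sum of (a - m)
def pvT (m : Int) : List Int → Int
  | [] => 0
  | a :: t => (a - m) + pvT m t

-- max suffix sum of (a - m), empty suffix included
def pvS (m : Int) : List Int → Int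
  | [] => 0
  | a :: t => max ((a - m) + pvT m t) (pvS m t)

-- min prefix sum of (a - m), empty prefix included
def pvMn (m : Int) : List Int → Int
  | [] => 0
  | a :: t => min 0 ((a - m) + pvMn m t)

-- the list of nonempty prefix sums starting from c
def pvSums (m c : Int) : List Int → List Int
  | [] => []
  | a :: t => (c + a - m) :: pvSums m (c + a - m) t

theorem pvT_le_pvS (m : Int) (l : List Int) : pvT m l ≤ pvS m l := by
  induction l with
  | nil => simp [pvT, pvS]
  | cons a t ih => simp only [pvT, pvS]; omega

theorem pvS_nonneg (m : Int) (l : List Int) : 0 ≤ pvS m l := by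
  induction l with
  | nil => simp [pvS]
  | cons a t ih => simp only [pvS]; omega

-- the identity behind B: max suffix sum = total − min prefix sum
theorem pvS_eq_pvT_sub_pvMn (m : Int) (l : List Int) : pvS m l = pvT m l - pvMn m l := by
  induction l with
  | nil => simp [pvS, pvT, pvMn]
  | cons a t ih => simp only [pvS, pvT, pvMn]; omega

-- A's clamped forward fold in closed form
theorem pvA_fold (m : Int) (l : List Int) :
    ∀ r : Int, 0 ≤ r →
      l.foldl (fun r a => max 0 (a + r - m)) r = max (pvS m l) (r + pvT m l) := by
  induction l with
  | nil => intro r hr; simp [pvS, pvT]; omega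
  | cons a t ih =>
    intro r hr
    simp only [List.foldl_cons, pvS, pvT]
    rw [ih _ (by omega)]
    have h1 := pvT_le_pvS m t
    omega

-- A's pair fold splits into the length count and the retain fold
theorem pvA_pair_fold (m : Int) (g : Int → Int) (idxs : List Int) :
    ∀ t0 r0 : Int,
      idxs.foldl
        (fun (st : Int × Int) i => (st.1 + 1, max 0 (g i + st.2 - m))) (t0, r0)
      = (t0 + idxs.length, idxs.foldl (fun r i => max 0 (g i + r - m)) r0) := by
  induction idxs with
  | nil => intro t0 r0; simp
  | cons i t ih =>
    intro t0 r0
    simp only [List.foldl_cons, ih, List.length_cons]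
    exact Prod.ext (by push_cast; ring) rfl

-- B's building loop, over the value list: it appends exactly the prefix sums
theorem pvB_build (m : Int) (l : List Int) :
    ∀ (p : List Int) (c : Int), PySem.List.pyGetD p (-1) 0 = c → p ≠ [] →
      l.foldl (fun pre x => pre ++ [PySem.List.pyGetD pre (-1) 0 + x - m]) p
        = p ++ pvSums m c l := by
  induction l with
  | nil => intro p c _ _; simp [pvSums]
  | cons x t ih =>
    intro p c hc hp
    simp only [List.foldl_cons, pvSums, hc]
    rw [ih (p ++ [c + x - m]) (c + x - m)
        (PySem.List.pyGetD_neg_one_append_singleton p (c + x - m) 0) (by simp)]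
    simp

theorem pvMn_nonpos (m : Int) (l : List Int) : pvMn m l ≤ 0 := by
  cases l <;> simp [pvMn]

-- the running min over the prefix-sum list
theorem pvB_min (m : Int) (l : List Int) :
    ∀ c r, r ≤ c → (pvSums m c l).foldl min r = min r (c + pvMn m l) := by
  induction l with
  | nil => intro c r h; simp [pvSums, pvMn]; omega
  | cons x t ih =>
    intro c r h
    simp only [pvSums, pvMn, List.foldl_cons]
    rw [ih (c + x - m) _ (by omega)]
    have := pvMn_nonpos m t
    omega

theorem pvSums_getLast (m : Int) (l : List Int) (hl : l ≠ []) :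
    ∀ c, (pvSums m c l).getLast (by cases l <;> simp_all [pvSums]) = c + pvT m l := by
  induction l with
  | nil => exact absurd rfl hl
  | cons x t ih =>
    intro c
    by_cases ht : t = []
    · subst ht; simp [pvSums, pvT]; ring
    · have htt : pvSums m (c + x - m) t ≠ [] := by cases t <;> simp_all [pvSums]
      simp only [pvSums, pvT]
      rw [List.getLast_cons htt, ih ht (c + x - m)]
      ring

theorem pvLast_lemma (m : Int) (l : List Int) :
    PySem.List.pyGetD (0 :: pvSums m 0 l) (-1) 0 = pvT m l := by
  rw [PySem.List.pyGetD_neg_one _ 0 (by simp)]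
  cases l with
  | nil => simp [pvSums, pvT]
  | cons x t =>
    have hs : pvSums m 0 (x :: t) ≠ [] := by simp [pvSums]
    rw [List.getLast_cons hs]
    have := pvSums_getLast m (x :: t) (by simp) 0
    rw [this]; ring

theorem pvMin_lemma (m : Int) (l : List Int) :
    (PySem.List.min? (0 :: pvSums m 0 l) (fun y => y)).getD 0 = pvMn m l := by
  rw [PySem.List.min?_id_cons]
  simp only [Option.getD_some]
  rw [pvB_min m l 0 0 le_rfl]
  have := pvMn_nonpos m l
  omega

-- the loops of both ports run over the same index list
theorem pvRange_max (n : Int) :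
    PySem.List.pyRange 0 (max n 0) 1 = PySem.List.pyRange 0 n 1 := by
  by_cases h : 0 ≤ n
  · rw [max_eq_left h]
  · rw [max_eq_right (by omega), PySem.List.pyRange_one_eq_nil (by omega),
        PySem.List.pyRange_one_eq_nil (by omega)]

-- both ports agree for any parsed array (the string only produces arr)
theorem pvMain (m n : Int) (arr : List Int) :
    (((PySem.List.pyRange 0 n 1).foldl
        (fun (st : Int × Int) i =>
          (st.1 + 1, max 0 (PySem.List.pyGetD arr i 0 + st.2 - m))) (0, 0)).1
      + PySem.Int.floordiv
          (((PySem.List.pyRange 0 n 1).foldl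
            (fun (st : Int × Int) i =>
              (st.1 + 1, max 0 (PySem.List.pyGetD arr i 0 + st.2 - m))) (0, 0)).2 + m - 1) m)
    = (let pre :=
        (PySem.List.pyRange 0 (max n 0) 1).foldl
          (fun (pre : List Int) i =>
            pre ++ [PySem.List.pyGetD pre (-1) 0 + PySem.List.pyGetD arr i 0 - m])
          [0]
       max n 0 + PySem.Int.floordiv
          ((PySem.List.pyGetD pre (-1) 0 - (PySem.List.min? pre (fun y => y)).getD 0)
            + m - 1) m) := by
  rw [pvRange_max]
  set l : List Int := (PySem.List.pyRange 0 n 1).map (fun i => PySem.List.pyGetD arr i 0) with hl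
  -- A side
  have hA : (PySem.List.pyRange 0 n 1).foldl
        (fun (st : Int × Int) i =>
          (st.1 + 1, max 0 (PySem.List.pyGetD arr i 0 + st.2 - m))) (0, 0)
      = ((0 : Int) + ((PySem.List.pyRange 0 n 1).length : Int),
         max (pvS m l) (0 + pvT m l)) := by
    rw [pvA_pair_fold m (fun i => PySem.List.pyGetD arr i 0)]
    refine congrArg _ ?_
    have hm : (PySem.List.pyRange 0 n 1).foldl
        (fun r i => max 0 (PySem.List.pyGetD arr i 0 + r - m)) 0
        = l.foldl (fun r a => max 0 (a + r - m)) 0 :=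
      (List.foldl_map (f := fun i => PySem.List.pyGetD arr i 0)
        (g := fun r a => max 0 (a + r - m))).symm
    rw [hm]
    exact pvA_fold m l 0 le_rfl
  -- B side: the built list is the prefix sums
  have hB : (PySem.List.pyRange 0 n 1).foldl
        (fun (pre : List Int) i =>
          pre ++ [PySem.List.pyGetD pre (-1) 0 + PySem.List.pyGetD arr i 0 - m]) [0]
      = 0 :: pvSums m 0 l := by
    have hm : (PySem.List.pyRange 0 n 1).foldl
        (fun (pre : List Int) i =>
          pre ++ [PySem.List.pyGetD pre (-1) 0 + PySem.List.pyGetD arr i 0 - m]) [0]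
        = l.foldl (fun pre x => pre ++ [PySem.List.pyGetD pre (-1) 0 + x - m]) [0] :=
      (List.foldl_map (f := fun i => PySem.List.pyGetD arr i 0)
        (g := fun (pre : List Int) x =>
          pre ++ [PySem.List.pyGetD pre (-1) 0 + x - m])).symm
    rw [hm, pvB_build m l [0] 0 (by
      rw [PySem.List.pyGetD_neg_one ([0] : List Int) 0 (by simp)]; rfl) (by simp)]
    simp
  rw [hA, hB]
  simp only [pvLast_lemma, pvMin_lemma, PySem.List.length_pyRange_one]
  have hS := pvS_nonneg m l
  have hT := pvT_le_pvS m l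
  have h1 : max (pvS m l) (0 + pvT m l) = pvS m l := by omega
  have h2 : pvT m l - pvMn m l = pvS m l := (pvS_eq_pvT_sub_pvMn m l).symm.symm ▸ by
    have := pvS_eq_pvT_sub_pvMn m l; omega
  have h3 : (0 : Int) + (((n - 0).toNat : Nat) : Int) = max n 0 := by omega
  rw [h1, h2, h3]

-- ===== VERDICT (by name: the statement is the Claim_ definition above) =====
theorem solution71_spec : Claim_equal_solution71 := by
  intro m n s _ _
  exact pvMain m n (((PySem.Str.split? s " ").getD []).map (fun t => (PySem.Int.ofStr? t).getD 0))
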